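-- pv_equiv track=rewrite | github.com/ronsse/experience-graph | src/xpgraph/retrieve/formatters.py | format_lessons_as_markdown
-- ===== SOURCE A (Python) =====
-- from typing import Any
--
-- def _estimate_tokens(text: str) -> int:
--     """Estimate token count (~4 chars per token)."""
--     return len(text) // 4 + 1
--
-- def format_lessons_as_markdown(
--     lessons: list[dict[str, Any]],
--     max_tokens: int = 2000,
-- ) -> str:
--     """Format precedent/lessons as markdown.
--
--     Args:
--         lessons: List of lesson/precedent dicts.
--         max_tokens: Maximum token budget.
--
--     Returns:
--         Markdown-formatted string.
--     """
--     if not lessons: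
--         return "No lessons found."
--
--     lines = [f"# Lessons Learned ({len(lessons)})", ""]
--     used = _estimate_tokens(lines[0])
--     included = 0
--
--     for lesson in lessons:
--         title = lesson.get("title", "Untitled")
--         desc = lesson.get("description", "")[:300]
--         domain = lesson.get("domain", "")
--
--         block = f"## {title}"
--         if domain:
--             block += f" [{domain}]"
--         block += f"\n{desc}\n"
--
--         block_tokens = _estimate_tokens(block)
--         if used + block_tokens > max_tokens:
--             remaining = len(lessons) - included
--             lines.append(f"\n*[{remaining} more lessons omitted]*")
--             break
--
--         lines.append(block)
--         used += block_tokens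
--         included += 1
--
--     return "\n".join(lines)
-- ===== SOURCE B (Python) =====
-- from typing import Any
--
-- def _estimate_tokens(text: str) -> int:
--     """Estimate token count (~4 chars per token)."""
--     return len(text) // 4 + 1
--
-- def _render_block(lesson: dict[str, Any]) -> str:
--     title = lesson.get("title", "Untitled")
--     desc = lesson.get("description", "")[:300]
--     domain = lesson.get("domain", "")
--     block = f"## {title}"
--     if domain:
--         block += f" [{domain}]"
--     return block + f"\n{desc}\n"
--
-- def format_lessons_as_markdown(
--     lessons: list[dict[str, Any]],
--     max_tokens: int = 2000,
-- ) -> str: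
--     """Two-phase: first decide how many blocks fit, then render."""
--     if not lessons:
--         return "No lessons found."
--     header = f"# Lessons Learned ({len(lessons)})"
--     blocks = [(b, _estimate_tokens(b)) for b in map(_render_block, lessons)]
--     # phase 1: find the cutoff index
--     used = _estimate_tokens(header)
--     cutoff = len(blocks)
--     for i, (_, t) in enumerate(blocks):
--         if used + t > max_tokens:
--             cutoff = i
--             break
--         used += t
--     # phase 2: render from the precomputed pieces
--     lines = [header, ""] + [b for b, _ in blocks[:cutoff]]
--     if cutoff < len(lessons):
--         lines.append(f"\n*[{len(lessons) - cutoff} more lessons omitted]*")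
--     return "\n".join(lines)
-- ===== Notes on version B (the rewrite author's own statement) =====
-- stated objective: alternative
-- what changed: B splits A's single interleaved build/check/break loop into two phases: it first precomputes every lesson's block and token estimate and finds the cutoff index where the budget is exceeded, then renders header, the first cutoff blocks and the omitted-count line from those precomputed pieces.
import Mathlib
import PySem

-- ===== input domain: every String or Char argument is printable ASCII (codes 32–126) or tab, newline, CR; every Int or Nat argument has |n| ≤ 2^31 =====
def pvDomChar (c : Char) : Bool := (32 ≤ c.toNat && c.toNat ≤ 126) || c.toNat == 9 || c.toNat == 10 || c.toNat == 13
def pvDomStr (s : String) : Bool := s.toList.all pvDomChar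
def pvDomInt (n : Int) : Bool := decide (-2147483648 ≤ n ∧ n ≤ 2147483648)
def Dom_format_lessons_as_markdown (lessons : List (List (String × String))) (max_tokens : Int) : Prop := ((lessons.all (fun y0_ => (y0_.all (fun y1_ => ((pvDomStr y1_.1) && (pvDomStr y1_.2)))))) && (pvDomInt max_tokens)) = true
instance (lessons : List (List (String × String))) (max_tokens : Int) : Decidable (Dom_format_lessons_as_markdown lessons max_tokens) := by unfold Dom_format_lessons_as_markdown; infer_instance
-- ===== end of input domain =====

-- B separates deciding how many lesson blocks fit in the budget from rendering them (two phases instead of A's interleaved build/check/break loop); objective: alternative decomposition, same cost.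

-- shared module helper _estimate_tokens (identical in Source A and Source B)
def pyEstimateTokens (text : String) : Int :=
  PySem.Int.floordiv (PySem.Str.len text) 4 + 1

-- shared rendering of one lesson's block (Source A computes it inline in the loop; Source B's _render_block)
def pyRenderBlock (lesson : List (String × String)) : String :=
  let title := (PySem.Dict.mk lesson).getD "title" "Untitled"
  let desc := PySem.Str.slice ((PySem.Dict.mk lesson).getD "description" "") none (some 300)
  let domain := (PySem.Dict.mk lesson).getD "domain" ""
  let block := "## " ++ title
  let block := if domain ≠ "" then block ++ " [" ++ domain ++ "]" else block
  block ++ "\n" ++ desc ++ "\n"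

-- ===== PORT A =====
-- A's for-loop with break: carries lines, used, included
def pvLoopA (rest : List (List (String × String))) (total : Nat) (lines : List String)
    (used included max_tokens : Int) : List String :=
  match rest with
  | [] => lines
  | lesson :: rest' =>
    let block := pyRenderBlock lesson
    let bt := pyEstimateTokens block
    if used + bt > max_tokens then
      lines ++ ["\n*[" ++ PySem.Int.toStr ((total : Int) - included) ++ " more lessons omitted]*"]
    else
      pvLoopA rest' total (lines ++ [block]) (used + bt) (included + 1) max_tokens

def format_lessons_as_markdown (lessons : List (List (String × String))) (max_tokens : Int) : String :=
  if lessons = [] then "No lessons found."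
  else
    let header := "# Lessons Learned (" ++ PySem.Int.toStr (lessons.length : Int) ++ ")"
    let lines := pvLoopA lessons lessons.length [header, ""] (pyEstimateTokens header) 0 max_tokens
    PySem.Str.join "\n" lines

-- ===== PORT B =====
-- phase 1: first index at which the running total would exceed the budget
def pvCutoff (blocks : List (String × Int)) (used max_tokens : Int) : Nat :=
  match blocks with
  | [] => 0
  | (_, t) :: rest => if used + t > max_tokens then 0 else 1 + pvCutoff rest (used + t) max_tokens

def format_lessons_as_markdown_alt (lessons : List (List (String × String))) (max_tokens : Int) : String :=
  if lessons = [] then "No lessons found."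
  else
    let header := "# Lessons Learned (" ++ PySem.Int.toStr (lessons.length : Int) ++ ")"
    let blocks := lessons.map (fun l => let b := pyRenderBlock l; (b, pyEstimateTokens b))
    let cutoff := pvCutoff blocks (pyEstimateTokens header) max_tokens
    let lines := [header, ""] ++ (blocks.take cutoff).map Prod.fst ++
      (if cutoff < lessons.length then
        ["\n*[" ++ PySem.Int.toStr ((lessons.length : Int) - (cutoff : Int)) ++ " more lessons omitted]*"]
       else [])
    PySem.Str.join "\n" lines

-- ===== PRECONDITION & SPEC =====
def Spec_format_lessons_as_markdown (lessons : List (List (String × String))) (max_tokens : Int) (out : String) : Prop := out = format_lessons_as_markdown_alt lessons max_tokens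
instance (lessons : List (List (String × String))) (max_tokens : Int) (out : String) : Decidable (Spec_format_lessons_as_markdown lessons max_tokens out) := by unfold Spec_format_lessons_as_markdown; infer_instance

-- ===== CLAIM (what is proved, stated in full; the proofs are below) =====
def Claim_equal_format_lessons_as_markdown : Prop := ∀ (lessons : List (List (String × String))) (max_tokens : Int), Dom_format_lessons_as_markdown lessons max_tokens → Spec_format_lessons_as_markdown lessons max_tokens (format_lessons_as_markdown lessons max_tokens)

-- ===== LEMMAS AND PROOFS =====

-- A's loop = prefix of precomputed blocks up to the cutoff, plus the omitted line if it stopped early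
lemma loopA_eq_cutoff (rest : List (List (String × String))) (total : Nat) (lines : List String)
    (used included max_tokens : Int) :
    pvLoopA rest total lines used included max_tokens =
      (let blocks := rest.map (fun l => let b := pyRenderBlock l; (b, pyEstimateTokens b));
       let k := pvCutoff blocks used max_tokens;
       lines ++ (blocks.take k).map Prod.fst ++
         (if k < rest.length then
           ["\n*[" ++ PySem.Int.toStr ((total : Int) - included - (k : Int)) ++ " more lessons omitted]*"]
          else [])) := by
  induction rest generalizing lines used included with
  | nil => simp [pvLoopA, pvCutoff]
  | cons lesson rest' ih =>
    simp only [pvLoopA, List.map_cons, pvCutoff]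
    by_cases h : used + pyEstimateTokens (pyRenderBlock lesson) > max_tokens
    · simp [h]
    · simp only [if_neg h, ih]
      have hk : ((1 + pvCutoff (rest'.map fun l => (pyRenderBlock l, pyEstimateTokens (pyRenderBlock l)))
          (used + pyEstimateTokens (pyRenderBlock lesson)) max_tokens : Nat) : Int)
          = 1 + (pvCutoff (rest'.map fun l => (pyRenderBlock l, pyEstimateTokens (pyRenderBlock l)))
          (used + pyEstimateTokens (pyRenderBlock lesson)) max_tokens : Int) := by push_cast; ring
      simp only [List.length_cons, hk]
      have harith : (total : Int) - included - (1 + (pvCutoff (rest'.map fun l => (pyRenderBlock l, pyEstimateTokens (pyRenderBlock l))) (used + pyEstimateTokens (pyRenderBlock lesson)) max_tokens : Int)) = (total : Int) - (included + 1) - (pvCutoff (rest'.map fun l => (pyRenderBlock l, pyEstimateTokens (pyRenderBlock l))) (used + pyEstimateTokens (pyRenderBlock lesson)) max_tokens : Int) := by ring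
    -- 1 + k < 1 + |rest'| ↔ k < |rest'|
      simp [harith, Nat.add_comm 1, List.append_assoc]

-- ===== VERDICT (by name: the statement is the Claim_ definition above) =====
theorem format_lessons_as_markdown_spec : Claim_equal_format_lessons_as_markdown := by
  intro lessons max_tokens _
  unfold Spec_format_lessons_as_markdown format_lessons_as_markdown format_lessons_as_markdown_alt
  by_cases h : lessons = []
  · simp [h]
  · simp only [if_neg h, loopA_eq_cutoff]
    simp
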